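-- pv_equiv track=rewrite | github.com/DangerNudel/LazyTortus | send_adsb.py | crc
-- ===== SOURCE A (Python) =====
-- def crc(msg, encode=False):
--     """Calculate CRC for ADS-B message"""
--     generator = 0xFFFA0480  # CRC polynomial for Mode-S
--
--     msg_bin = bin(int(msg, 16))[2:].zfill(len(msg) * 4)
--
--     if encode:
--         msg_bin += '0' * 24
--
--     msg_int = int(msg_bin, 2)
--
--     for i in range(len(msg_bin) - 24):
--         if (msg_int >> (len(msg_bin) - i - 1)) & 1:
--             msg_int ^= generator >> i
--
--     return msg_int & 0xFFFFFF
-- ===== SOURCE B (Python) =====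
-- def crc(msg, encode=False):
--     # Only the first 32 division steps can change the register (the generator
--     # shifted right by 32 or more is 0), so compute just those decision bits
--     # with their feedback, then xor their generator contributions into the
--     # low 24 bits -- O(number of top bits) instead of a bignum op per bit.
--     GEN = 0xFFFA0480
--     n = int(msg, 16)
--     L = max(n.bit_length(), 1, 4 * len(msg)) + (24 if encode else 0)
--     m0 = n << 24 if encode else n
--     steps = min(L - 24, 32)
--     c = []
--     for i in range(steps):
--         v = (m0 >> (L - 1 - i)) & 1
--         for j in range(i):
--             v ^= c[j] & (GEN >> (L - 1 - i + j)) & 1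
--         c.append(v)
--     out = m0 & 0xFFFFFF
--     for i in range(steps):
--         if c[i]:
--             out ^= (GEN >> i) & 0xFFFFFF
--     return out
-- ===== Notes on version B (the rewrite author's own statement) =====
-- stated objective: faster
-- what changed: B exploits that the generator right-shifted by 32 or more is zero, so only the first min(L-24,32) division steps can change the register: it computes just those decision bits (top bits of the message plus their mutual feedback) and xors their masked generator contributions into the low 24 bits, instead of A's per-message-bit bignum shift/xor loop.
import Mathlib
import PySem

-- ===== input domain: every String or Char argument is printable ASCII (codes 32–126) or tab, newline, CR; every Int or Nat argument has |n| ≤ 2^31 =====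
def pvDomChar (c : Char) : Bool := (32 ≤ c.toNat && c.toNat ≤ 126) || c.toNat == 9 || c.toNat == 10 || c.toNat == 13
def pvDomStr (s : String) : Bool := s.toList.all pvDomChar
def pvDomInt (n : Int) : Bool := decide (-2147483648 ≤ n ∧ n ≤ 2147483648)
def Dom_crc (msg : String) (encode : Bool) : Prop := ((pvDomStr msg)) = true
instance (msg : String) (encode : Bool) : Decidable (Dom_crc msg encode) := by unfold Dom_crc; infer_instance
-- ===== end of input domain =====

-- B computes only the ≤ 32 division steps that can change the register (the generator
-- shifted right by ≥ 32 is zero) instead of a bignum shift/xor per message bit.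


-- ===== PORT A =====

-- bin(n)[2:] for n > 0: binary digits of n, most significant first ([] for n = 0)
def pvBinChars (n : Nat) : List Char :=
  if h : n = 0 then [] else pvBinChars (n / 2) ++ [if n % 2 = 1 then '1' else '0']
decreasing_by exact Nat.div_lt_self (Nat.pos_of_ne_zero h) one_lt_two

def crc (msg : String) (encode : Bool) : Int :=
  match PySem.Int.ofStrBase? msg 16 with
  | none => 0   -- int(msg, 16) raises ValueError here: outside Pre_crc
  | some n0 =>
    -- Pre_crc gives 0 ≤ n0 (on a negative value Python raises ValueError at int('b…', 2));
    -- on nonnegative ints Python's >> & ^ coincide with Nat's, so the state is kept as Nat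
    let n : Nat := n0.toNat
    let digs : List Char := if n = 0 then ['0'] else pvBinChars n          -- bin(n)[2:]
    -- .zfill(len(msg) * 4)  (len(msg) = number of characters; msg is ASCII on Dom_crc)
    let msgBin : List Char := List.replicate (msg.toList.length * 4 - digs.length) '0' ++ digs
    let msgBin : List Char := if encode then msgBin ++ List.replicate 24 '0' else msgBin
    let LL : Nat := msgBin.length
    -- int(msg_bin, 2), ported by hand: msg_bin is always a nonempty string of '0'/'1'
    -- digits, on which int(s, 2) is exactly this most-significant-first Horner fold
    let mstart : Nat := msgBin.foldl (fun a c => 2 * a + (if c = '1' then 1 else 0)) 0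
    let mfin : Nat := (List.range (LL - 24)).foldl
      (fun m i => if (m >>> (LL - i - 1)) &&& 1 = 1 then m ^^^ (0xFFFA0480 >>> i) else m) mstart
    ((mfin &&& 0xFFFFFF : Nat) : Int)

-- ===== PORT B =====

def crc_alt (msg : String) (encode : Bool) : Int :=
  match PySem.Int.ofStrBase? msg 16 with
  | none => 0   -- int(msg, 16) raises ValueError here: outside Pre_crc
  | some n0 =>
    -- 0 ≤ n0 under Pre_crc; on nonnegative ints Python's >> & ^ << coincide with Nat's
    let n : Nat := n0.toNat
    let LL : Nat := max (max (PySem.Int.bitLength n0) 1) (4 * msg.toList.length)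
                    + (if encode then 24 else 0)
    let m0 : Nat := if encode then n <<< 24 else n
    let steps : Nat := min (LL - 24) 32
    let cl : List Nat := (List.range steps).foldl (fun cl i =>
      cl ++ [(List.range i).foldl
               (fun v j => v ^^^ (cl.getD j 0 &&& (0xFFFA0480 >>> (LL - 1 - i + j)) &&& 1))
               ((m0 >>> (LL - 1 - i)) &&& 1)]) []
    let out : Nat := (List.range steps).foldl (fun out i =>
      if cl.getD i 0 ≠ 0 then out ^^^ ((0xFFFA0480 >>> i) &&& 0xFFFFFF) else out)
      (m0 &&& 0xFFFFFF)
    (out : Int)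

-- ===== PRECONDITION & SPEC =====

-- A returns normally exactly when int(msg, 16) succeeds with a nonnegative value: a failed
-- parse raises ValueError in int(msg, 16), and a negative value makes A raise ValueError
-- at int(bin(n)[2:]…, 2) (bin of a negative starts '-0b').
def Pre_crc (msg : String) (encode : Bool) : Prop :=
  0 ≤ (PySem.Int.ofStrBase? msg 16).getD (-1)
instance (msg : String) (encode : Bool) : Decidable (Pre_crc msg encode) := by
  unfold Pre_crc; infer_instance

def pvWitness_crc : String × Bool := ("1A2B3C", false)

def Spec_crc (msg : String) (encode : Bool) (out : Int) : Prop := out = crc_alt msg encode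
instance (msg : String) (encode : Bool) (out : Int) : Decidable (Spec_crc msg encode out) := by
  unfold Spec_crc; infer_instance

-- ===== CLAIM (what is proved, stated in full; the proofs are below) =====
def Claim_equal_crc : Prop := ∀ (msg : String) (encode : Bool), Dom_crc msg encode → Pre_crc msg encode → Spec_crc msg encode (crc msg encode)

-- ===== LEMMAS AND PROOFS =====

-- the state of A's division loop after i steps
def pvM (m0 LL : Nat) : Nat → Nat
  | 0 => m0
  | i + 1 =>
    let m := pvM m0 LL i
    if (m >>> (LL - i - 1)) &&& 1 = 1 then m ^^^ (0xFFFA0480 >>> i) else m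

-- the decision bit of step i
def pvCS (m0 LL i : Nat) : Nat := (pvM m0 LL i >>> (LL - i - 1)) &&& 1

theorem pv_foldA_eq_pvM (m0 LL : Nat) (s : Nat) :
    (List.range s).foldl
      (fun m i => if (m >>> (LL - i - 1)) &&& 1 = 1 then m ^^^ (0xFFFA0480 >>> i) else m) m0
      = pvM m0 LL s := by
  induction s with
  | zero => rfl
  | succ s ih => rw [List.range_succ, List.foldl_append, ih]; rfl

theorem pv_shift32 (s : Nat) (h : 32 ≤ s) : (0xFFFA0480 : Nat) >>> s = 0 := by
  rw [Nat.shiftRight_eq_div_pow]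
  exact Nat.div_eq_of_lt (lt_of_lt_of_le (by norm_num) (Nat.pow_le_pow_right (by norm_num) h))

theorem pv_pvM_stable (m0 LL a b : Nat) (h32 : 32 ≤ a) (hab : a ≤ b) :
    pvM m0 LL b = pvM m0 LL a := by
  induction b with
  | zero => omega
  | succ b ih =>
    rcases Nat.lt_or_ge a (b+1) with h | h
    · have hb : a ≤ b := by omega
      show (let m := pvM m0 LL b; if (m >>> (LL - b - 1)) &&& 1 = 1 then m ^^^ (0xFFFA0480 >>> b) else m) = _
      simp only [pv_shift32 b (by omega), Nat.xor_zero, ite_self]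
      exact ih hb
    · have : a = b + 1 := by omega
      rw [this]

theorem pv_bit_toNat (m p : Nat) : (m >>> p) &&& 1 = (m.testBit p).toNat := by
  rw [Nat.testBit_eq_decide_div_mod_eq, Nat.and_one_is_mod, Nat.shiftRight_eq_div_pow]
  rcases Nat.mod_two_eq_zero_or_one (m / 2 ^ p) with h | h <;> simp [h]

theorem pv_testBit_pvM (m0 LL : Nat) (i p : Nat) :
    (pvM m0 LL i).testBit p =
      (List.range i).foldl
        (fun b j => b.xor (decide (pvCS m0 LL j = 1) && (0xFFFA0480 : Nat).testBit (j + p)))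
        (m0.testBit p) := by
  induction i with
  | zero => rfl
  | succ i ih =>
    rw [List.range_succ, List.foldl_append, ← ih]
    show (let m := pvM m0 LL i;
      if (m >>> (LL - i - 1)) &&& 1 = 1 then m ^^^ (0xFFFA0480 >>> i) else m).testBit p = _
    simp only [List.foldl_cons, List.foldl_nil]
    by_cases h : pvCS m0 LL i = 1
    · rw [if_pos (by simpa [pvCS] using h), Nat.testBit_xor, Nat.testBit_shiftRight]
      simp [h]
    · rw [if_neg (by simpa [pvCS] using h)]
      simp [h]

theorem pv_cs_le_one (m0 LL i : Nat) : pvCS m0 LL i ≤ 1 := by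
  unfold pvCS; exact Nat.and_le_right

theorem pv_bool_fold (js : List Nat) (f : Nat → Bool) (b : Bool) :
    js.foldl (fun v j => v ^^^ (f j).toNat) b.toNat
      = (js.foldl (fun v j => v.xor (f j)) b).toNat := by
  induction js generalizing b with
  | nil => rfl
  | cons j js ih =>
    simp only [List.foldl_cons]
    rw [show b.toNat ^^^ (f j).toNat = (b.xor (f j)).toNat by cases b <;> cases h : f j <;> simp,
        ih]

theorem pv_bit01_and (c x : Nat) (hc : c ≤ 1) :
    c &&& x &&& 1 = (decide (c = 1) && x.testBit 0).toNat := by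
  interval_cases c <;> rcases Nat.mod_two_eq_zero_or_one x with h | h <;>
    simp [Nat.and_one_is_mod, Nat.testBit_eq_decide_div_mod_eq, h]

-- the value B's inner loop computes at step i equals A's decision bit there
theorem pv_vcomp (m0 LL i : Nat) :
    (List.range i).foldl
      (fun v j => v ^^^
        (((List.range i).map (pvCS m0 LL)).getD j 0 &&& (0xFFFA0480 >>> (LL - 1 - i + j)) &&& 1))
      ((m0 >>> (LL - 1 - i)) &&& 1) = pvCS m0 LL i := by
  have hsub : LL - i - 1 = LL - 1 - i := by omega
  have hterm : ∀ v j, j ∈ List.range i →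
      v ^^^ (((List.range i).map (pvCS m0 LL)).getD j 0 &&& (0xFFFA0480 >>> (LL - 1 - i + j)) &&& 1)
        = v ^^^ (decide (pvCS m0 LL j = 1) && (0xFFFA0480 : Nat).testBit (j + (LL - 1 - i))).toNat := by
    intro v j hj
    have hj' : j < i := List.mem_range.mp hj
    congr 1
    rw [List.getD_eq_getElem _ _ (by simpa using hj'), List.getElem_map, List.getElem_range,
        pv_bit01_and _ _ (pv_cs_le_one m0 LL j)]
    congr 2
    rw [Nat.testBit_shiftRight, Nat.add_zero, Nat.add_comm]
  rw [PySem.List.foldl_congr_mem _ _ _ _ hterm, pv_bit_toNat, pv_bool_fold, pvCS, pv_bit_toNat, hsub,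
      pv_testBit_pvM]

-- B's list-building loop produces exactly A's decision bits
theorem pv_cl_build (m0 LL steps : Nat) :
    (List.range steps).foldl (fun cl i =>
      cl ++ [(List.range i).foldl
               (fun v j => v ^^^ (cl.getD j 0 &&& (0xFFFA0480 >>> (LL - 1 - i + j)) &&& 1))
               ((m0 >>> (LL - 1 - i)) &&& 1)]) []
      = (List.range steps).map (pvCS m0 LL) := by
  induction steps with
  | zero => rfl
  | succ s ih =>
    rw [List.range_succ, List.foldl_append, ih, List.map_append]
    simp only [List.foldl_cons, List.foldl_nil, List.map_cons, List.map_nil]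
    congr 1
    exact congrArg (fun x => [x]) (pv_vcomp m0 LL s)

theorem pv_outfold (m0 LL steps : Nat) :
    (List.range steps).foldl (fun out i =>
      if ((List.range steps).map (pvCS m0 LL)).getD i 0 ≠ 0
      then out ^^^ ((0xFFFA0480 >>> i) &&& 0xFFFFFF) else out)
      (m0 &&& 0xFFFFFF)
      = pvM m0 LL steps &&& 0xFFFFFF := by
  suffices h : ∀ s, s ≤ steps →
      (List.range s).foldl (fun out i =>
        if ((List.range steps).map (pvCS m0 LL)).getD i 0 ≠ 0
        then out ^^^ ((0xFFFA0480 >>> i) &&& 0xFFFFFF) else out)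
        (m0 &&& 0xFFFFFF)
        = pvM m0 LL s &&& 0xFFFFFF by
    exact h steps le_rfl
  intro s hs
  induction s with
  | zero => rfl
  | succ s ih =>
    rw [List.range_succ, List.foldl_append, ih (by omega)]
    simp only [List.foldl_cons, List.foldl_nil]
    have hget : ((List.range steps).map (pvCS m0 LL)).getD s 0 = pvCS m0 LL s := by
      rw [List.getD_eq_getElem _ _ (by simp; omega)]
      simp [List.getElem_map, List.getElem_range]
    have hle := pv_cs_le_one m0 LL s
    by_cases h : pvCS m0 LL s = 1
    · rw [if_pos (by rw [hget, h]; omega)]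
      show _ = (let m := pvM m0 LL s;
        if (m >>> (LL - s - 1)) &&& 1 = 1 then m ^^^ (0xFFFA0480 >>> s) else m) &&& 0xFFFFFF
      rw [if_pos (by simpa [pvCS] using h), Nat.and_xor_distrib_right]
    · have h0 : pvCS m0 LL s = 0 := by omega
      rw [if_neg (by rw [hget, h0]; simp)]
      show _ = (let m := pvM m0 LL s;
        if (m >>> (LL - s - 1)) &&& 1 = 1 then m ^^^ (0xFFFA0480 >>> s) else m) &&& 0xFFFFFF
      rw [if_neg (by simpa [pvCS] using h)]

-- length of the binary expansion is bit_length
theorem pv_binChars_length (n : Nat) : (pvBinChars n).length = PySem.Int.bitLength (n : Int) := by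
  induction n using Nat.strong_induction_on with
  | _ n ih =>
    rw [pvBinChars]
    by_cases h : n = 0
    · simp [h, PySem.Int.bitLength_zero]
    · rw [dif_neg h, List.length_append, ih (n / 2) (Nat.div_lt_self (Nat.pos_of_ne_zero h) one_lt_two),
          PySem.Int.bitLength_natCast (Nat.pos_of_ne_zero h)]
      simp

-- Horner fold with arbitrary accumulator
theorem pv_horner_init (cs : List Char) (a : Nat) :
    cs.foldl (fun a c => 2 * a + (if c = '1' then 1 else 0)) a
      = a * 2 ^ cs.length + cs.foldl (fun a c => 2 * a + (if c = '1' then 1 else 0)) 0 := by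
  induction cs generalizing a with
  | nil => simp
  | cons c cs ih =>
    simp only [List.foldl_cons, List.length_cons]
    rw [ih (2 * a + _), ih (2 * 0 + _)]
    ring

theorem pv_horner_replicate (k : Nat) :
    (List.replicate k '0').foldl (fun a c => 2 * a + (if c = '1' then 1 else 0)) 0 = 0 := by
  induction k with
  | zero => rfl
  | succ k ih => rw [List.replicate_succ]; simpa using ih

theorem pv_horner_binChars (n : Nat) :
    (pvBinChars n).foldl (fun a c => 2 * a + (if c = '1' then 1 else 0)) 0 = n := by
  induction n using Nat.strong_induction_on with
  | _ n ih =>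
    rw [pvBinChars]
    by_cases h : n = 0
    · simp [h]
    · rw [dif_neg h, List.foldl_append, pv_horner_init,
          ih (n / 2) (Nat.div_lt_self (Nat.pos_of_ne_zero h) one_lt_two)]
      rcases Nat.mod_two_eq_zero_or_one n with hm | hm <;> simp [hm] <;> omega

theorem pv_pvM_min (m0 LL s : Nat) : pvM m0 LL s = pvM m0 LL (min s 32) := by
  rcases Nat.le_total s 32 with h | h
  · rw [Nat.min_eq_left h]
  · rw [Nat.min_eq_right h]
    exact pv_pvM_stable m0 LL 32 s le_rfl h

theorem pv_A_val (msg : String) (encode : Bool) (n0 : Int)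
    (hof : PySem.Int.ofStrBase? msg 16 = some n0) (hn0 : 0 ≤ n0) :
    crc msg encode =
      (((pvM (if encode then n0.toNat <<< 24 else n0.toNat)
          (max (max (PySem.Int.bitLength n0) 1) (4 * msg.toList.length) + (if encode then 24 else 0))
          (min ((max (max (PySem.Int.bitLength n0) 1) (4 * msg.toList.length) + (if encode then 24 else 0)) - 24) 32))
        &&& 0xFFFFFF : Nat) : Int) := by
  have hn : ((n0.toNat : Nat) : Int) = n0 := Int.toNat_of_nonneg hn0
  unfold crc
  rw [hof]
  dsimp only
  rw [pv_foldA_eq_pvM]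
  set w : Nat := msg.toList.length
  set digs : List Char := if n0.toNat = 0 then ['0'] else pvBinChars n0.toNat with hdigs
  have hd : digs.length = max (PySem.Int.bitLength n0) 1 := by
    rw [hdigs]
    by_cases h : n0.toNat = 0
    · have h0 : n0 = 0 := by omega
      simp [h0, PySem.Int.bitLength_zero]
    · rw [if_neg h, pv_binChars_length, hn]
      have h1 := PySem.Int.bitLength_natCast (m := n0.toNat) (Nat.pos_of_ne_zero h)
      rw [hn] at h1
      omega
  have hlen : (if encode = true
        then (List.replicate (w * 4 - digs.length) '0' ++ digs) ++ List.replicate 24 '0'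
        else List.replicate (w * 4 - digs.length) '0' ++ digs).length
      = max (max (PySem.Int.bitLength n0) 1) (4 * w) + (if encode = true then 24 else 0) := by
    cases encode <;> simp [List.length_append, hd] <;> omega
  have hX : (List.replicate (w * 4 - digs.length) '0' ++ digs).foldl
      (fun a c => 2 * a + (if c = '1' then 1 else 0)) 0 = n0.toNat := by
    rw [List.foldl_append, pv_horner_replicate, hdigs]
    by_cases h : n0.toNat = 0
    · simp [h]
    · rw [if_neg h, pv_horner_binChars]
  have hm : (if encode = true
        then (List.replicate (w * 4 - digs.length) '0' ++ digs) ++ List.replicate 24 '0'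
        else List.replicate (w * 4 - digs.length) '0' ++ digs).foldl
      (fun a c => 2 * a + (if c = '1' then 1 else 0)) 0
      = (if encode = true then n0.toNat <<< 24 else n0.toNat) := by
    cases encode
    · simpa using hX
    · simp only [reduceIte]
      rw [List.foldl_append, hX, pv_horner_init, pv_horner_replicate, List.length_replicate,
          Nat.shiftLeft_eq]
      ring
  rw [hlen, hm, pv_pvM_min]

theorem pv_B_val (msg : String) (encode : Bool) (n0 : Int)
    (hof : PySem.Int.ofStrBase? msg 16 = some n0) :
    crc_alt msg encode =
      (((pvM (if encode then n0.toNat <<< 24 else n0.toNat)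
          (max (max (PySem.Int.bitLength n0) 1) (4 * msg.toList.length) + (if encode then 24 else 0))
          (min ((max (max (PySem.Int.bitLength n0) 1) (4 * msg.toList.length) + (if encode then 24 else 0)) - 24) 32))
        &&& 0xFFFFFF : Nat) : Int) := by
  unfold crc_alt
  rw [hof]
  dsimp only
  rw [pv_cl_build, pv_outfold]

-- ===== VERDICT (by name: the statement is the Claim_ definition above) =====
theorem crc_spec : Claim_equal_crc := by
  intro msg encode hdom hpre
  unfold Spec_crc
  rcases hof : PySem.Int.ofStrBase? msg 16 with _ | n0
  · unfold crc crc_alt; rw [hof]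
  · have hn0 : 0 ≤ n0 := by
      have h := hpre; unfold Pre_crc at h; rw [hof] at h; simpa using h
    rw [pv_A_val msg encode n0 hof hn0, pv_B_val msg encode n0 hof]
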